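-- pv_equiv track=rewrite | github.com/Yuraist/pymatrixmod | pymatrixmod.py | observability_matrix
-- ===== SOURCE A (Python) =====
-- def multiply_matrix(A, B):
-- 	N = len(A)
-- 	M = len(A[0])
-- 	P = len(B[0])
--
-- 	C = [[i for i in range(P)] for j in range(N)]
--
-- 	for i in range(N):
-- 		for j in range(P):
-- 			sum = 0
-- 			for k in range(M):
-- 				sum += int(A[i][k]) * int(B[k][j])
-- 			C[i][j] = sum
-- 	return C
--
-- def pow_matrix(matrix, n):
-- 	new_matrix = matrix[:]
--
-- 	for i in range(n - 1):
-- 		new_matrix = multiply_matrix(matrix, new_matrix)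
--
-- 	return new_matrix
--
-- def observability_matrix(A, C):
-- 	result_matrix = []
-- 	result_matrix.append(C)
--
-- 	for n in range(1, len(A)):
-- 		power = pow_matrix(A, n)
-- 		product = multiply_matrix(C, power)
-- 		result_matrix.append(product)
--
-- 	for i in range(len(result_matrix)):
-- 		result_matrix[i] = result_matrix[i][0]
--
-- 	return result_matrix
-- ===== SOURCE B (Python) =====
-- def observability_matrix(A, C):
--     n = len(A)
--     row = list(C[0])
--     rows = [row]
--     for _ in range(1, n):
--         row = [sum(row[k] * A[k][j] for k in range(n)) for j in range(n)]
--         rows.append(row)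
--     return rows
-- ===== Notes on version B (the rewrite author's own statement) =====
-- stated objective: faster
-- what changed: Instead of recomputing A^n from scratch for every n (pow_matrix) and multiplying the full matrix C by it, B keeps only the single row it needs (C[0]*A^k) and updates it with one vector-matrix product per step.
-- outside the precondition, e.g. on observability_matrix([[1, 2], [3, 4]], [[5], [6, 7]]): A returns [[5], [5, 10]], B raises IndexError; on observability_matrix([[1, 2, 3], [4, 5, 6]], [[1, 2]]): A returns [[1, 2], [9, 12, 15]], B returns [[1, 2], [9, 12]]
import Mathlib
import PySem

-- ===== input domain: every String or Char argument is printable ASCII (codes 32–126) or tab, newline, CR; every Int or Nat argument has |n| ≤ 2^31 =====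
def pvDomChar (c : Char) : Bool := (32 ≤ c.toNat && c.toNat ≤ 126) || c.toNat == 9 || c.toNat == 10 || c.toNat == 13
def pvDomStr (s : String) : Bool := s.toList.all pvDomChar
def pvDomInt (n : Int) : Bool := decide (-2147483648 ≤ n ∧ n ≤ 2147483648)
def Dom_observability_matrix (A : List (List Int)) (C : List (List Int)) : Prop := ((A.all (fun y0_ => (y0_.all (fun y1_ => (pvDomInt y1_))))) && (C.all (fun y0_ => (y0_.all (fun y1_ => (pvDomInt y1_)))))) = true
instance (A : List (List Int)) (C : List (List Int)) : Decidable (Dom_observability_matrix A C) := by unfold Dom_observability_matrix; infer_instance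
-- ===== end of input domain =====

-- B replaces A's per-step recomputation of A^n and full C·A^n products by keeping only the
-- single needed row C[0]·A^k, updated by one vector-matrix product per step (objective: faster).


-- ===== PORT A =====
-- the inner 'sum += int(A[i][k]) * int(B[k][j])' loop; indexing via getD (in range on Pre_)
def pvDot (X Y : List (List Int)) (M i j : Nat) : Int :=
  (List.range M).foldl (fun s k => s + (X.getD i []).getD k 0 * (Y.getD k []).getD j 0) 0

def multiply_matrix (X Y : List (List Int)) : List (List Int) :=
  let N := X.length
  let M := (X.getD 0 []).length
  let P := (Y.getD 0 []).length
  let C0 := (List.range N).map (fun _ => (List.range P).map (fun i => (i : Int)))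
  (List.range N).foldl (fun Cm i =>
    (List.range P).foldl (fun Cm2 j =>
      Cm2.set i ((Cm2.getD i []).set j (pvDot X Y M i j))) Cm) C0

-- 'new_matrix = matrix[:]' is a shallow copy: ported as the list itself
def pow_matrix (m : List (List Int)) (n : Int) : List (List Int) :=
  (PySem.List.pyRange 0 (n - 1) 1).foldl (fun nm _ => multiply_matrix m nm) m

def observability_matrix (A : List (List Int)) (C : List (List Int)) : List (List Int) :=
  let result := (PySem.List.pyRange 1 (A.length : Int) 1).foldl
    (fun acc n => acc ++ [multiply_matrix C (pow_matrix A n)]) [C]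
  result.map (fun r => r.getD 0 [])

-- ===== PORT B =====
-- one vector-matrix product: row ↦ row·A (the comprehension in Source B)
def pvRowStep (A : List (List Int)) (n : Nat) (r : List Int) : List Int :=
  (List.range n).map (fun j =>
    (List.range n).foldl (fun s k => s + r.getD k 0 * (A.getD k []).getD j 0) 0)

def observability_matrix_alt (A : List (List Int)) (C : List (List Int)) : List (List Int) :=
  let n := A.length
  let row0 := C.getD 0 []
  ((List.range (n - 1)).foldl (fun st _ =>
      (st.1 ++ [pvRowStep A n st.2], pvRowStep A n st.2)) (([row0] : List (List Int)), row0)).1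

-- ===== PRECONDITION & SPEC =====
-- Pre_ restricts to well-formed matrix inputs: C nonempty and (when A has ≥ 2 rows, the only case
-- where any multiplication happens) A square n×n, C's first row of length n, and no row of C
-- shorter than the first. It excludes ragged inputs on which A either raises an IndexError or
-- silently truncates the sums to the length of the first row.
def Pre_observability_matrix (A : List (List Int)) (C : List (List Int)) : Prop :=
  C ≠ [] ∧ (2 ≤ A.length →
    ((∀ r ∈ A, r.length = A.length) ∧ (C.getD 0 []).length = A.length ∧
      ∀ r ∈ C, (C.getD 0 []).length ≤ r.length))
instance (A : List (List Int)) (C : List (List Int)) : Decidable (Pre_observability_matrix A C) := by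
  unfold Pre_observability_matrix; infer_instance

def pvWitness_observability_matrix : List (List Int) × List (List Int) :=
  ([[1, 2], [3, 4]], [[5, 6]])

def Spec_observability_matrix (A : List (List Int)) (C : List (List Int)) (out : List (List Int)) : Prop := out = observability_matrix_alt A C
instance (A : List (List Int)) (C : List (List Int)) (out : List (List Int)) : Decidable (Spec_observability_matrix A C out) := by unfold Spec_observability_matrix; infer_instance

-- ===== CLAIM (what is proved, stated in full; the proofs are below) =====
def Claim_equal_observability_matrix : Prop := ∀ (A : List (List Int)) (C : List (List Int)), Dom_observability_matrix A C → Pre_observability_matrix A C → Spec_observability_matrix A C (observability_matrix A C)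

-- ===== LEMMAS AND PROOFS =====

-- matrix entry accessor used throughout the proofs
def pvEnt (X : List (List Int)) (i j : Nat) : Int := (X.getD i []).getD j 0

-- squareness of a list-of-lists matrix
def pvSq (n : Nat) (X : List (List Int)) : Prop :=
  X.length = n ∧ ∀ i, i < n → (X.getD i []).length = n

theorem pv_foldl_add_sum (f : Nat → Int) (m : Nat) (a : Int) :
    (List.range m).foldl (fun s k => s + f k) a = a + ∑ k ∈ Finset.range m, f k := by
  induction m with
  | zero => simp
  | succ m ih =>
      rw [List.range_succ, List.foldl_append, ih]
      simp [Finset.sum_range_succ]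
      ring

theorem pvDot_eq_sum (X Y : List (List Int)) (M i j : Nat) :
    pvDot X Y M i j = ∑ k ∈ Finset.range M, pvEnt X i k * pvEnt Y k j := by
  unfold pvDot pvEnt
  rw [pv_foldl_add_sum]
  simp

theorem pv_set_foldl_length (js : List Nat) (f : Nat → Int) (L : List Int) :
    (js.foldl (fun r j => r.set j (f j)) L).length = L.length := by
  induction js generalizing L with
  | nil => rfl
  | cons j js ih => rw [List.foldl_cons, ih, List.length_set]

theorem pv_getD_set {α : Type} (d : α) (L : List α) (j : Nat) (v : α) (i : Nat) :
    (L.set j v).getD i d = if j = i ∧ j < L.length then v else L.getD i d := by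
  simp only [List.getD_eq_getElem?_getD, List.getElem?_set]
  split_ifs with h1 h2 h3 h3 <;> simp_all <;> omega

theorem pv_set_foldl_getD (js : List Nat) (f : Nat → Int) (L : List Int) (i : Nat) :
    (js.foldl (fun r j => r.set j (f j)) L).getD i 0 =
      if i ∈ js ∧ i < L.length then f i else L.getD i 0 := by
  induction js generalizing L with
  | nil => simp
  | cons j js ih =>
      rw [List.foldl_cons, ih, List.length_set, pv_getD_set]
      by_cases hij : i ∈ js <;> by_cases hj : j = i <;> by_cases hlt : i < L.length <;>
        simp_all <;> omega

theorem pv_rowfold_eq_map (P : Nat) (f : Nat → Int) (L : List Int) (h : L.length = P) :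
    (List.range P).foldl (fun r j => r.set j (f j)) L = (List.range P).map f := by
  apply List.ext_getElem
  · rw [pv_set_foldl_length]; simp [h]
  · intro i h1 h2
    have hlen : ((List.range P).foldl (fun r j => r.set j (f j)) L).length = P := by
      rw [pv_set_foldl_length, h]
    have hiP : i < P := by rwa [hlen] at h1
    have hg := pv_set_foldl_getD (List.range P) f L i
    rw [List.getD_eq_getElem _ _ h1] at hg
    rw [hg]
    simp [List.mem_range, hiP, h]

theorem pv_inner_extract (js : List Nat) (i : Nat) (f : Nat → Int) (Cm : List (List Int)) :
    js.foldl (fun Cm2 j => Cm2.set i ((Cm2.getD i []).set j (f j))) Cm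
      = Cm.set i (js.foldl (fun r j => r.set j (f j)) (Cm.getD i [])) := by
  induction js generalizing Cm with
  | nil =>
      simp only [List.foldl_nil]
      by_cases hlt : i < Cm.length
      · conv_lhs => rw [← List.set_getElem_self hlt]
        rw [List.getD_eq_getElem _ _ hlt]
      · rw [List.set_eq_of_length_le (by omega)]
  | cons j js ih =>
      simp only [List.foldl_cons]
      rw [ih]
      rw [List.set_set]
      congr 2
      by_cases hlt : i < Cm.length
      · rw [pv_getD_set]; simp [hlt]
      · rw [pv_getD_set]
        have h1 : Cm[i]? = none := List.getElem?_eq_none (by omega)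
        simp [hlt, List.getD_eq_getElem?_getD, h1]

theorem pv_outer_length (js : List Nat) (u : Nat → List Int → List Int) (C0 : List (List Int)) :
    (js.foldl (fun Cm i => Cm.set i (u i (Cm.getD i []))) C0).length = C0.length := by
  induction js generalizing C0 with
  | nil => rfl
  | cons j js ih => rw [List.foldl_cons, ih, List.length_set]

theorem pv_outer_getD (js : List Nat) (hnd : js.Nodup) (u : Nat → List Int → List Int)
    (C0 : List (List Int)) (i : Nat) :
    (js.foldl (fun Cm i' => Cm.set i' (u i' (Cm.getD i' []))) C0).getD i []
      = if i ∈ js ∧ i < C0.length then u i (C0.getD i []) else C0.getD i [] := by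
  induction js generalizing C0 with
  | nil => simp
  | cons j js ih =>
      obtain ⟨hjn, hnd'⟩ := List.nodup_cons.mp hnd
      rw [List.foldl_cons, ih hnd', List.length_set]
      by_cases hj : i = j
      · subst hj
        have hij : i ∉ js := hjn
        by_cases hlt : i < C0.length
        · simp [hij, hlt, pv_getD_set]
        · simp [hij, hlt, pv_getD_set]
      · have hset : (C0.set j (u j (C0.getD j []))).getD i [] = C0.getD i [] := by
          rw [pv_getD_set, if_neg (fun h => hj h.1.symm)]
        simp only [hset, List.mem_cons]
        by_cases hij : i ∈ js <;> simp [hij, hj]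

theorem pv_getD_map_range {α : Type} (f : Nat → α) (n i : Nat) (d : α) (h : i < n) :
    ((List.range n).map f).getD i d = f i := by
  rw [List.getD_eq_getElem?_getD, List.getElem?_map, List.getElem?_range h]
  rfl

theorem pv_outer_eq_map (N : Nat) (u : Nat → List Int → List Int) (C0 : List (List Int))
    (h : C0.length = N) :
    (List.range N).foldl (fun Cm i => Cm.set i (u i (Cm.getD i []))) C0
      = (List.range N).map (fun i => u i (C0.getD i [])) := by
  apply List.ext_getElem
  · rw [pv_outer_length]; simp [h]
  · intro i h1 h2
    have hN : i < N := by rw [pv_outer_length, h] at h1; exact h1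
    have hgd := pv_outer_getD (List.range N) List.nodup_range u C0 i
    simp only [List.mem_range, hN, true_and, h, if_pos] at hgd
    rw [List.getD_eq_getElem _ _ h1] at hgd
    rw [hgd, List.getElem_map, List.getElem_range]

theorem pv_mm_eq (X Y : List (List Int)) :
    multiply_matrix X Y = (List.range X.length).map (fun i =>
      (List.range (Y.getD 0 []).length).map (fun j => pvDot X Y (X.getD 0 []).length i j)) := by
  unfold multiply_matrix
  simp only [pv_inner_extract]
  refine (pv_outer_eq_map X.length
      (fun i row => (List.range (Y.getD 0 []).length).foldl
        (fun r j => r.set j (pvDot X Y (X.getD 0 []).length i j)) row)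
      _ (by simp)).trans ?_
  apply List.map_congr_left
  intro i hi
  rw [pv_getD_map_range _ _ _ _ (List.mem_range.mp hi)]
  exact pv_rowfold_eq_map _ _ _ (by simp)

theorem pv_mm_length (X Y : List (List Int)) : (multiply_matrix X Y).length = X.length := by
  rw [pv_mm_eq]; simp

theorem pv_mm_getD (X Y : List (List Int)) (i : Nat) (hi : i < X.length) :
    (multiply_matrix X Y).getD i []
      = (List.range (Y.getD 0 []).length).map (fun j => pvDot X Y (X.getD 0 []).length i j) := by
  rw [pv_mm_eq, pv_getD_map_range _ _ _ _ hi]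

theorem pv_ent_mm (X Y : List (List Int)) (i j : Nat) (hi : i < X.length)
    (hj : j < (Y.getD 0 []).length) :
    pvEnt (multiply_matrix X Y) i j
      = ∑ k ∈ Finset.range (X.getD 0 []).length, pvEnt X i k * pvEnt Y k j := by
  unfold pvEnt
  rw [pv_mm_getD _ _ _ hi, pv_getD_map_range _ _ _ _ hj, pvDot_eq_sum]
  rfl

theorem pv_sq_mm {n : Nat} {X Y : List (List Int)} (hn : 0 < n) (hX : pvSq n X)
    (hY : pvSq n Y) : pvSq n (multiply_matrix X Y) := by
  obtain ⟨hXl, hXr⟩ := hX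
  obtain ⟨hYl, hYr⟩ := hY
  constructor
  · rw [pv_mm_length, hXl]
  · intro i hi
    rw [pv_mm_getD _ _ _ (by omega : i < X.length), List.length_map, List.length_range]
    exact hYr 0 hn

theorem pv_mm_assoc {n : Nat} {X Y Z : List (List Int)} (hn : 0 < n) (hX : pvSq n X)
    (hY : pvSq n Y) (hZ : pvSq n Z) :
    multiply_matrix (multiply_matrix X Y) Z = multiply_matrix X (multiply_matrix Y Z) := by
  have hX0 : (X.getD 0 []).length = n := hX.2 0 hn
  have hY0 : (Y.getD 0 []).length = n := hY.2 0 hn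
  have hZ0 : (Z.getD 0 []).length = n := hZ.2 0 hn
  have hXY : pvSq n (multiply_matrix X Y) := pv_sq_mm hn hX hY
  have hYZ : pvSq n (multiply_matrix Y Z) := pv_sq_mm hn hY hZ
  rw [pv_mm_eq (multiply_matrix X Y) Z, pv_mm_eq X (multiply_matrix Y Z),
    hXY.1, hX.1, hZ0, hYZ.2 0 hn, hXY.2 0 hn, hX0]
  apply List.map_congr_left
  intro i hi
  rw [List.mem_range] at hi
  apply List.map_congr_left
  intro j hj
  rw [List.mem_range] at hj
  rw [pvDot_eq_sum, pvDot_eq_sum]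
  have hL : ∀ k ∈ Finset.range n, pvEnt (multiply_matrix X Y) i k * pvEnt Z k j
      = (∑ l ∈ Finset.range n, pvEnt X i l * pvEnt Y l k) * pvEnt Z k j := by
    intro k hk
    rw [Finset.mem_range] at hk
    rw [pv_ent_mm X Y i k (by rw [hX.1]; exact hi) (by rw [hY0]; exact hk), hX0]
  have hR : ∀ l ∈ Finset.range n, pvEnt X i l * pvEnt (multiply_matrix Y Z) l j
      = pvEnt X i l * ∑ k ∈ Finset.range n, pvEnt Y l k * pvEnt Z k j := by
    intro l hl
    rw [Finset.mem_range] at hl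
    rw [pv_ent_mm Y Z l j (by rw [hY.1]; exact hl) (by rw [hZ0]; exact hj), hY0]
  rw [Finset.sum_congr rfl hL, Finset.sum_congr rfl hR]
  simp only [Finset.sum_mul, Finset.mul_sum]
  rw [Finset.sum_comm]
  exact Finset.sum_congr rfl fun l _ => Finset.sum_congr rfl fun k _ => by ring

theorem pv_sq_iter {n : Nat} {A : List (List Int)} (hn : 0 < n) (hA : pvSq n A) (k : Nat) :
    pvSq n ((fun M => multiply_matrix A M)^[k] A) := by
  induction k with
  | zero => simpa using hA
  | succ k ih =>
      rw [Function.iterate_succ_apply']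
      exact pv_sq_mm hn hA ih

theorem pv_comm_iter {n : Nat} {A : List (List Int)} (hn : 0 < n) (hA : pvSq n A) (k : Nat) :
    multiply_matrix A ((fun M => multiply_matrix A M)^[k] A)
      = multiply_matrix ((fun M => multiply_matrix A M)^[k] A) A := by
  induction k with
  | zero => simp
  | succ k ih =>
      rw [Function.iterate_succ_apply']
      conv_lhs => rw [ih]
      rw [← pv_mm_assoc hn hA (pv_sq_iter hn hA k) hA]

theorem pv_foldl_const {α : Type} (l : List α) (g : List (List Int) → List (List Int))
    (x0 : List (List Int)) : l.foldl (fun x _ => g x) x0 = g^[l.length] x0 := by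
  induction l generalizing x0 with
  | nil => rfl
  | cons x t ih =>
      rw [List.foldl_cons, ih, List.length_cons, Function.iterate_succ_apply]

theorem pv_pow_eq_iter (A : List (List Int)) (n : Int) :
    pow_matrix A n = (fun M => multiply_matrix A M)^[(n - 1).toNat] A := by
  unfold pow_matrix
  rw [pv_foldl_const]
  congr 1
  rw [PySem.List.length_pyRange_one]
  simp

-- base case: row 0 of C·X, for any X, depends only on C's first row
theorem pv_row0_mm (C X : List (List Int)) (hC : 0 < C.length) :
    (multiply_matrix C X).getD 0 []
      = (List.range (X.getD 0 []).length).map (fun j => pvDot C X (C.getD 0 []).length 0 j) := by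
  rw [pv_mm_getD _ _ _ hC]

theorem pv_row0_mm_A {n : Nat} {A C : List (List Int)} (hn : 0 < n) (hA : pvSq n A)
    (hC : 0 < C.length) (hC0 : (C.getD 0 []).length = n) :
    (multiply_matrix C A).getD 0 [] = pvRowStep A n (C.getD 0 []) := by
  rw [pv_row0_mm C A hC]
  unfold pvRowStep pvDot
  rw [hA.2 0 hn, hC0]

-- inductive step: row 0 of C·(P·A) is (row 0 of C·P)·A
theorem pv_row0_step {n : Nat} {A C P : List (List Int)} (hn : 0 < n) (hA : pvSq n A)
    (hP : pvSq n P) (hC : 0 < C.length) (hC0 : (C.getD 0 []).length = n) :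
    (multiply_matrix C (multiply_matrix P A)).getD 0 []
      = pvRowStep A n ((multiply_matrix C P).getD 0 []) := by
  have hA0 : (A.getD 0 []).length = n := hA.2 0 hn
  have hP0 : (P.getD 0 []).length = n := hP.2 0 hn
  have hPA : pvSq n (multiply_matrix P A) := pv_sq_mm hn hP hA
  have hPA0 : ((multiply_matrix P A).getD 0 []).length = n := hPA.2 0 hn
  rw [pv_row0_mm C _ hC, hPA0, hC0]
  have hr : (multiply_matrix C P).getD 0 []
      = (List.range n).map (fun j => pvDot C P n 0 j) := by
    rw [pv_row0_mm C P hC, hP0, hC0]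
  rw [hr]
  unfold pvRowStep
  apply List.map_congr_left
  intro j hj
  rw [List.mem_range] at hj
  rw [pvDot_eq_sum, pv_foldl_add_sum, zero_add]
  show (∑ k ∈ Finset.range n, pvEnt C 0 k * pvEnt (multiply_matrix P A) k j)
      = ∑ k ∈ Finset.range n,
          ((List.range n).map (fun j' => pvDot C P n 0 j')).getD k 0 * pvEnt A k j
  have hLs : ∀ k ∈ Finset.range n, pvEnt C 0 k * pvEnt (multiply_matrix P A) k j
      = ∑ l ∈ Finset.range n, pvEnt C 0 k * (pvEnt P k l * pvEnt A l j) := by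
    intro k hk
    rw [Finset.mem_range] at hk
    rw [pv_ent_mm P A k j (by rw [hP.1]; exact hk) (by rw [hA0]; exact hj), hP0,
      Finset.mul_sum]
  have hRs : ∀ k ∈ Finset.range n,
      ((List.range n).map (fun j' => pvDot C P n 0 j')).getD k 0 * pvEnt A k j
      = ∑ l ∈ Finset.range n, pvEnt C 0 l * (pvEnt P l k * pvEnt A k j) := by
    intro k hk
    rw [Finset.mem_range] at hk
    rw [pv_getD_map_range _ _ _ _ hk, pvDot_eq_sum, Finset.sum_mul]
    exact Finset.sum_congr rfl fun l _ => by ring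
  rw [Finset.sum_congr rfl hLs, Finset.sum_congr rfl hRs, Finset.sum_comm]

theorem pv_key {n : Nat} {A C : List (List Int)} (hn : 0 < n) (hA : pvSq n A)
    (hC : 0 < C.length) (hC0 : (C.getD 0 []).length = n) (k : Nat) :
    (multiply_matrix C ((fun M => multiply_matrix A M)^[k] A)).getD 0 []
      = (pvRowStep A n)^[k + 1] (C.getD 0 []) := by
  induction k with
  | zero =>
      simp only [Function.iterate_zero, id_eq, Function.iterate_one, zero_add]
      exact pv_row0_mm_A hn hA hC hC0
  | succ k ih =>
      rw [Function.iterate_succ_apply' (fun M => multiply_matrix A M) k A]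
      rw [pv_comm_iter hn hA k]
      rw [pv_row0_step hn hA (pv_sq_iter hn hA k) hC hC0]
      rw [ih]
      exact (Function.iterate_succ_apply' (pvRowStep A n) (k + 1) (C.getD 0 [])).symm

theorem pv_bfold (m : Nat) (g : List Int → List Int) (r0 : List Int) :
    ((List.range m).foldl (fun st _ => (st.1 ++ [g st.2], g st.2))
        (([r0] : List (List Int)), r0))
      = ((List.range (m + 1)).map (fun k => g^[k] r0), g^[m] r0) := by
  induction m with
  | zero => simp
  | succ m ih =>
      rw [List.range_succ, List.foldl_append, ih]
      simp [List.range_succ, Function.iterate_succ_apply']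

-- ===== VERDICT (by name: the statement is the Claim_ definition above) =====
theorem observability_matrix_spec : Claim_equal_observability_matrix := by
  intro A C _hdom hpre
  obtain ⟨hCne, hsh⟩ := hpre
  have hC : 0 < C.length := List.length_pos_of_ne_nil hCne
  show observability_matrix A C = observability_matrix_alt A C
  by_cases hn2 : 2 ≤ A.length
  · obtain ⟨hAr, hC0, _⟩ := hsh hn2
    have hn : 0 < A.length := by omega
    have hA : pvSq A.length A := by
      refine ⟨rfl, fun i hi => ?_⟩
      rw [List.getD_eq_getElem _ _ hi]
      exact hAr _ (List.getElem_mem hi)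
    simp only [observability_matrix_alt]
    rw [pv_bfold]
    simp only [observability_matrix]
    rw [PySem.List.foldl_append_singleton_eq_map]
    rw [show A.length - 1 + 1 = A.length from by omega]
    rw [PySem.List.pyRange_one]
    rw [show ((A.length : Int) - 1).toNat = A.length - 1 from by omega]
    conv_rhs => rw [show A.length = (A.length - 1) + 1 from by omega, List.range_succ_eq_map]
    simp only [List.map_append, List.map_map, List.map_cons, List.map_nil,
      Function.iterate_zero, id_eq, List.singleton_append]
    refine congrArg₂ List.cons rfl ?_
    apply List.map_congr_left
    intro k hk
    rw [List.mem_range] at hk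
    simp only [Function.comp_apply]
    rw [pv_pow_eq_iter, show ((1 : Int) + (k : Int) - 1).toNat = k from by omega]
    rw [pv_key hn hA hC hC0 k]
    rw [show A.length - 1 + 1 = A.length from by omega]
  · simp only [observability_matrix, observability_matrix_alt]
    rw [PySem.List.pyRange_one_eq_nil (by omega : (A.length : Int) ≤ 1)]
    rw [show A.length - 1 = 0 from by omega]
    simp
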